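-- pv_equiv track=rewrite | github.com/missionpinball/mpf-mc | mpfmc/widgets/segment_display_emulator.py | encode_characters
-- ===== SOURCE A (Python) =====
-- from typing import Optional, List, Dict, Any
--
-- OFF = 0
--
-- def encode_characters(text: str, character_count: int, segment_map: Dict[int, int],
--                       dot_enabled: bool, dot_segment_mask: int,
--                       comma_enabled: bool, comma_segment_mask: int) -> List[int]:
--     """Encode the text characters to prepare for display."""
--     text_position = 0
--     encoded_characters = []
--     while text_position < len(text):
--         char = text[text_position]
--         text_position += 1
--         encoded_char = segment_map.get(ord(char), 0x00)
--         if dot_enabled or comma_enabled: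
--             # embed dots is enabled and dot is inactive
--             try:
--                 next_char = text[text_position]
--             except IndexError:
--                 next_char = " "
--             if dot_enabled and next_char == ".":
--                 # next char is a dot -> turn dot on
--                 encoded_char |= dot_segment_mask
--                 text_position += 1
--             elif comma_enabled and next_char == ",":
--                 # next char is a dot -> turn dot on
--                 encoded_char |= comma_segment_mask
--                 text_position += 1
--
--         encoded_characters.append(encoded_char)
--
--     # remove leading segments if mapping is too long
--     if character_count < len(encoded_characters):
--         encoded_characters = encoded_characters[-character_count:]
--
--     while character_count > len(encoded_characters):
--         # prepend spaces to pad mapping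
--         encoded_characters.insert(0, OFF)
--
--     return encoded_characters
-- ===== SOURCE B (Python) =====
-- OFF = 0
--
-- def encode_characters(text, character_count, segment_map,
--                       dot_enabled, dot_segment_mask,
--                       comma_enabled, comma_segment_mask):
--     """Tokenize-then-map re-implementation: first split the text into
--     1-or-2-char units (a char plus an optional '.'/',' suffix when enabled),
--     then map each unit to its segment code, then fix the length."""
--     units = []
--     for ch in text:
--         if units and len(units[-1]) == 1 and \
--                 ((dot_enabled and ch == '.') or (comma_enabled and ch == ',')):
--             units[-1] += ch
--         else:
--             units.append(ch)
--     codes = []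
--     for u in units:
--         code = segment_map.get(ord(u[0]), 0x00)
--         if len(u) == 2:
--             code |= dot_segment_mask if u[1] == '.' else comma_segment_mask
--         codes.append(code)
--     if character_count < len(codes):
--         codes = codes[-character_count:]
--     return [OFF] * (character_count - len(codes)) + codes
-- ===== Notes on version B (the rewrite author's own statement) =====
-- stated objective: alternative
-- what changed: Replaces A's single index-based while loop with manual lookahead and in-loop position skipping by a two-phase pipeline: one pass tokenizes the text into 1-or-2-char units (char plus optional enabled '.'/',' suffix), a second pass maps each unit to its segment code; padding uses list multiplication instead of A's insert(0,...) loop.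
import Mathlib
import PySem

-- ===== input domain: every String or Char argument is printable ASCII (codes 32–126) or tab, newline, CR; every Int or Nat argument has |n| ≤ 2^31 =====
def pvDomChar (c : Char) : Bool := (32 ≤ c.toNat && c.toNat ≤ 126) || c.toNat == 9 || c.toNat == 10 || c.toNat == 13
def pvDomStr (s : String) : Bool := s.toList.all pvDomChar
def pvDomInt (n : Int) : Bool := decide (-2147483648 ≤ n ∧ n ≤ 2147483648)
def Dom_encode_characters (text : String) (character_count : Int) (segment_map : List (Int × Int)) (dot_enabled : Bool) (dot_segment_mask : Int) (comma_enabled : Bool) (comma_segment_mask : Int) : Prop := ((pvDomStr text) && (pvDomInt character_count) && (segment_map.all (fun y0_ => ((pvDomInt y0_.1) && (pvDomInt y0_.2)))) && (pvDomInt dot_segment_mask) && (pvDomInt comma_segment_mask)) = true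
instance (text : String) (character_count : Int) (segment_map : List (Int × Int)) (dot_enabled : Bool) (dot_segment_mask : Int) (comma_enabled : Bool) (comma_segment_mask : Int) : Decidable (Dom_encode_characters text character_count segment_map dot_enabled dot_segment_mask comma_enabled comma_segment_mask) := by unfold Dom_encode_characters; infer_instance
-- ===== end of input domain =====

-- ===== PORT A =====
-- B re-implements A as a tokenize-then-map pipeline (one pass building 1-or-2-char
-- units, one pass mapping units to codes) instead of A's single index-based scan
-- with lookahead; same return value on every input (objective: alternative).

-- A's while loop: position scan with one-character lookahead, consuming the
-- lookahead when it is an enabled '.' or ','.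
def pvEncLoopA (segment_map : List (Int × Int)) (dot_enabled : Bool) (dot_segment_mask : Int)
    (comma_enabled : Bool) (comma_segment_mask : Int) : List Char → List Int
  | [] => []
  | c :: rest =>
    -- encoded_char = segment_map.get(ord(char), 0x00)   (written inline below)
    if dot_enabled || comma_enabled then
      match rest with
      | [] => [(PySem.Dict.mk segment_map).getD (c.toNat : Int) 0]   -- next_char = " " (IndexError branch): no merge, loop ends
      | n :: rest' =>
        if dot_enabled && (n == '.') then
          PySem.Int.bor ((PySem.Dict.mk segment_map).getD (c.toNat : Int) 0) dot_segment_mask ::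
            pvEncLoopA segment_map dot_enabled dot_segment_mask comma_enabled comma_segment_mask rest'
        else if comma_enabled && (n == ',') then
          PySem.Int.bor ((PySem.Dict.mk segment_map).getD (c.toNat : Int) 0) comma_segment_mask ::
            pvEncLoopA segment_map dot_enabled dot_segment_mask comma_enabled comma_segment_mask rest'
        else
          (PySem.Dict.mk segment_map).getD (c.toNat : Int) 0 ::
            pvEncLoopA segment_map dot_enabled dot_segment_mask comma_enabled comma_segment_mask (n :: rest')
    else
      (PySem.Dict.mk segment_map).getD (c.toNat : Int) 0 ::
        pvEncLoopA segment_map dot_enabled dot_segment_mask comma_enabled comma_segment_mask rest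

-- A's final 'while character_count > len: insert(0, OFF)' loop.
def pvPadLoopA (character_count : Int) (xs : List Int) : List Int :=
  if character_count > (xs.length : Int) then pvPadLoopA character_count (0 :: xs) else xs
termination_by (character_count - xs.length).toNat
decreasing_by simp; omega

def encode_characters (text : String) (character_count : Int) (segment_map : List (Int × Int)) (dot_enabled : Bool) (dot_segment_mask : Int) (comma_enabled : Bool) (comma_segment_mask : Int) : List Int :=
  let encoded_characters :=
    pvEncLoopA segment_map dot_enabled dot_segment_mask comma_enabled comma_segment_mask text.toList
  let encoded_characters :=
    if character_count < (encoded_characters.length : Int) then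
      PySem.List.slice encoded_characters (some (-character_count)) none   -- encoded_characters[-character_count:]
    else encoded_characters
  pvPadLoopA character_count encoded_characters

-- ===== PORT B =====
-- Source B's tokenizer step: append ch as a suffix of the last unit when it is open
-- (length 1) and ch is an enabled '.'/','; otherwise start a new unit.
def pvUnitStep (dot_enabled comma_enabled : Bool) (units : List (List Char)) (ch : Char) : List (List Char) :=
  -- 'if units and len(units[-1]) == 1 and ((dot_enabled and ch == '.') or (comma_enabled and ch == ',')):'
  if units ≠ [] ∧ (units.getLast?.getD []).length = 1 ∧
      ((dot_enabled ∧ ch = '.') ∨ (comma_enabled ∧ ch = ',')) then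
    units.dropLast ++ [units.getLast?.getD [] ++ [ch]]   -- units[-1] += ch
  else
    units ++ [[ch]]

-- Source B's second loop body: unit → segment code.
def pvCodeOf (segment_map : List (Int × Int)) (dot_segment_mask comma_segment_mask : Int)
    (u : List Char) : Int :=
  match u with
  | [] => 0   -- unreachable: units are never empty
  | [a] => (PySem.Dict.mk segment_map).getD (a.toNat : Int) 0
  | a :: b :: _ =>
    PySem.Int.bor ((PySem.Dict.mk segment_map).getD (a.toNat : Int) 0)
      (if b == '.' then dot_segment_mask else comma_segment_mask)

def encode_characters_alt (text : String) (character_count : Int) (segment_map : List (Int × Int)) (dot_enabled : Bool) (dot_segment_mask : Int) (comma_enabled : Bool) (comma_segment_mask : Int) : List Int :=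
  let units := text.toList.foldl (pvUnitStep dot_enabled comma_enabled) []
  let codes := units.map (pvCodeOf segment_map dot_segment_mask comma_segment_mask)
  let codes :=
    if character_count < (codes.length : Int) then
      PySem.List.slice codes (some (-character_count)) none   -- codes[-character_count:]
    else codes
  List.replicate (character_count - codes.length).toNat 0 ++ codes

-- ===== PRECONDITION & SPEC =====
def Spec_encode_characters (text : String) (character_count : Int) (segment_map : List (Int × Int)) (dot_enabled : Bool) (dot_segment_mask : Int) (comma_enabled : Bool) (comma_segment_mask : Int) (out : List Int) : Prop := out = encode_characters_alt text character_count segment_map dot_enabled dot_segment_mask comma_enabled comma_segment_mask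
instance (text : String) (character_count : Int) (segment_map : List (Int × Int)) (dot_enabled : Bool) (dot_segment_mask : Int) (comma_enabled : Bool) (comma_segment_mask : Int) (out : List Int) : Decidable (Spec_encode_characters text character_count segment_map dot_enabled dot_segment_mask comma_enabled comma_segment_mask out) := by unfold Spec_encode_characters; infer_instance

-- ===== CLAIM (what is proved, stated in full; the proofs are below) =====
def Claim_equal_encode_characters : Prop := ∀ (text : String) (character_count : Int) (segment_map : List (Int × Int)) (dot_enabled : Bool) (dot_segment_mask : Int) (comma_enabled : Bool) (comma_segment_mask : Int), Dom_encode_characters text character_count segment_map dot_enabled dot_segment_mask comma_enabled comma_segment_mask → Spec_encode_characters text character_count segment_map dot_enabled dot_segment_mask comma_enabled comma_segment_mask (encode_characters text character_count segment_map dot_enabled dot_segment_mask comma_enabled comma_segment_mask)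

-- ===== LEMMAS AND PROOFS =====


-- step never returns the empty list
theorem pvUnitStep_ne_nil (de ce : Bool) (us : List (List Char)) (c : Char) :
    pvUnitStep de ce us c ≠ [] := by
  unfold pvUnitStep
  split <;> simp

-- the step only touches the last unit, so a prefix of units passes through
theorem pvUnitStep_append (de ce : Bool) (vs ws : List (List Char)) (c : Char) (h : ws ≠ []) :
    pvUnitStep de ce (vs ++ ws) c = vs ++ pvUnitStep de ce ws c := by
  unfold pvUnitStep
  rw [List.getLast?_append_of_ne_nil _ h]
  by_cases hc : (ws.getLast?.getD []).length = 1 ∧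
      ((de = true ∧ c = '.') ∨ (ce = true ∧ c = ',')) 
  · rw [if_pos ⟨by simp [h], hc.1, hc.2⟩, if_pos ⟨h, hc.1, hc.2⟩,
      List.dropLast_append_of_ne_nil h, List.append_assoc]
  · rw [if_neg (by rintro ⟨-, h1, h2⟩; exact hc ⟨h1, h2⟩),
      if_neg (by rintro ⟨-, h1, h2⟩; exact hc ⟨h1, h2⟩), List.append_assoc]

theorem pvFoldl_stepU_append (de ce : Bool) (l : List Char) (vs ws : List (List Char))
    (h : ws ≠ []) :
    l.foldl (pvUnitStep de ce) (vs ++ ws) = vs ++ l.foldl (pvUnitStep de ce) ws := by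
  induction l generalizing ws with
  | nil => simp
  | cons c l ih =>
    simp only [List.foldl_cons]
    rw [pvUnitStep_append de ce vs ws c h, ih _ (pvUnitStep_ne_nil de ce ws c)]

-- restarting after a closed (length ≠ 1) last unit is the same as starting fresh
theorem pvFoldl_stepU_closed (de ce : Bool) (l : List Char) (vs : List (List Char))
    (h : (vs.getLast?.getD []).length ≠ 1) :
    l.foldl (pvUnitStep de ce) vs = vs ++ l.foldl (pvUnitStep de ce) [] := by
  cases l with
  | nil => simp
  | cons c l =>
    have hstep : pvUnitStep de ce vs c = vs ++ [[c]] := by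
      unfold pvUnitStep
      rw [if_neg (by rintro ⟨-, h1, -⟩; exact h h1)]
    have hnil : pvUnitStep de ce [] c = [[c]] := by unfold pvUnitStep; rfl
    simp only [List.foldl_cons, hstep, hnil]
    exact pvFoldl_stepU_append de ce l vs [[c]] (by simp)

-- with both flags off the tokenizer just splits into single characters
theorem pvFoldl_stepU_flags_off (l : List Char) (vs : List (List Char)) :
    l.foldl (pvUnitStep false false) vs = vs ++ l.map (fun c => [c]) := by
  induction l generalizing vs with
  | nil => simp
  | cons c l ih =>
    have hstep : pvUnitStep false false vs c = vs ++ [[c]] := by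
      unfold pvUnitStep
      rw [if_neg (by rintro ⟨-, -, (⟨h, -⟩ | ⟨h, -⟩)⟩ <;> exact Bool.false_ne_true h)]
    simp only [List.foldl_cons, hstep, ih, List.map_cons]
    simp

-- the heart: mapping codes over the tokenization equals A's scanning loop
theorem pvTokenize_eq_scan (sm : List (Int × Int)) (de : Bool) (dm : Int) (ce : Bool)
    (cm : Int) (l : List Char) :
    (l.foldl (pvUnitStep de ce) []).map (pvCodeOf sm dm cm) = pvEncLoopA sm de dm ce cm l := by
  have hnil : ∀ c, pvUnitStep de ce [] c = [[c]] := fun c => by unfold pvUnitStep; rfl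
  fun_induction pvEncLoopA sm de dm ce cm l with
  | case1 => simp
  | case2 c hguard =>
    simp [hnil, pvCodeOf]
  | case3 c hguard n rest' hdot ih =>
    have hde : de = true := by simp_all
    have hn : n = '.' := by simp_all
    have h2 : pvUnitStep de ce [[c]] n = [[c, n]] := by
      unfold pvUnitStep
      rw [if_pos ⟨by simp, by simp, Or.inl ⟨hde, hn⟩⟩]
      rfl
    simp only [List.foldl_cons, hnil, h2]
    rw [pvFoldl_stepU_closed de ce rest' [[c, n]] (by simp)]
    simp [pvCodeOf, hn, ih]
  | case4 c hguard n rest' hdot hcomma ih =>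
    have hce : ce = true := by simp_all
    have hn : n = ',' := by simp_all
    have h2 : pvUnitStep de ce [[c]] n = [[c, n]] := by
      unfold pvUnitStep
      rw [if_pos ⟨by simp, by simp, Or.inr ⟨hce, hn⟩⟩]
      rfl
    have hnd : (n == '.') = false := by simp [hn]
    simp only [List.foldl_cons, hnil, h2]
    rw [pvFoldl_stepU_closed de ce rest' [[c, n]] (by simp)]
    simp [pvCodeOf, hnd, ih]
  | case5 c hguard n rest' hdot hcomma ih =>
    have h2 : pvUnitStep de ce [[c]] n = [[c], [n]] := by
      unfold pvUnitStep
      rw [if_neg (by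
        rintro ⟨-, -, (⟨h1, rfl⟩ | ⟨h1, rfl⟩)⟩
        · simp [h1] at hdot
        · simp [h1] at hcomma)]
      rfl
    simp only [List.foldl_cons, hnil, h2]
    have hsplit : ([[c], [n]] : List (List Char)) = [[c]] ++ [[n]] := rfl
    rw [hsplit, pvFoldl_stepU_append de ce rest' [[c]] [[n]] (by simp)]
    simp only [List.foldl_cons, hnil] at ih
    simp [pvCodeOf, ih]
  | case6 c rest hguard ih =>
    have hde : de = false := by simp_all
    have hce : ce = false := by simp_all
    subst hde hce
    rw [pvFoldl_stepU_flags_off (c :: rest) []]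
    rw [pvFoldl_stepU_flags_off rest []] at ih
    simp only [List.nil_append, List.map_cons, List.map_map] at *
    simp [pvCodeOf, ih]

-- A's prepend-one-at-a-time padding loop is replicate-and-append
theorem pvPadLoopA_eq (cc : Int) (xs : List Int) :
    pvPadLoopA cc xs = List.replicate (cc - xs.length).toNat 0 ++ xs := by
  fun_induction pvPadLoopA cc xs with
  | case1 xs h ih =>
    rw [ih]
    have hk : (cc - xs.length).toNat = (cc - ((0 :: xs) : List Int).length).toNat + 1 := by
      simp at h ⊢; omega
    rw [hk, List.replicate_succ']
    simp
  | case2 xs h =>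
    have : (cc - xs.length).toNat = 0 := by simp at h; omega
    simp [this]

-- ===== VERDICT (by name: the statement is the Claim_ definition above) =====
theorem encode_characters_spec : Claim_equal_encode_characters := by
  intro text cc sm de dm ce cm _
  unfold Spec_encode_characters encode_characters encode_characters_alt
  rw [← pvTokenize_eq_scan sm de dm ce cm text.toList, pvPadLoopA_eq]
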